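-- pv_equiv track=rewrite | github.com/keo571/netquery | src/text_to_sql/tools/excel_schema_parser.py | _generate_table_description
-- ===== SOURCE A (Python) =====
-- def _generate_table_description(table_name: str) -> str:
--     """Generate semantic description for table based on name patterns."""
--     table_lower = table_name.lower()
--
--     # Common table patterns
--     if 'user' in table_lower:
--         return 'User account and profile information'
--     elif 'order' in table_lower:
--         return 'Order transactions and purchase records'
--     elif 'product' in table_lower:
--         return 'Product catalog and inventory data'
--     elif 'customer' in table_lower:
--         return 'Customer information and details'
--     elif 'mapping' in table_lower or 'junction' in table_lower:
--         return 'Junction table for many-to-many relationships'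
--     elif any(word in table_lower for word in ['log', 'audit', 'history']):
--         return 'Historical records and audit trail'
--     elif 'config' in table_lower or 'setting' in table_lower:
--         return 'Configuration and system settings'
--     else:
--         return f'{table_name.replace("_", " ").title()} data table'
-- ===== SOURCE B (Python) =====
-- # keyword -> (priority, description); equal priorities share the same description
-- _KEYWORD_INFO = {
--     'user': (0, 'User account and profile information'),
--     'order': (1, 'Order transactions and purchase records'),
--     'product': (2, 'Product catalog and inventory data'),
--     'customer': (3, 'Customer information and details'),
--     'mapping': (4, 'Junction table for many-to-many relationships'),
--     'junction': (4, 'Junction table for many-to-many relationships'),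
--     'log': (5, 'Historical records and audit trail'),
--     'audit': (5, 'Historical records and audit trail'),
--     'history': (5, 'Historical records and audit trail'),
--     'config': (6, 'Configuration and system settings'),
--     'setting': (6, 'Configuration and system settings'),
-- }
--
-- def _generate_table_description(table_name: str) -> str:
--     """Generate semantic description for table based on name patterns."""
--     table_lower = table_name.lower()
--     hits = [info for kw, info in _KEYWORD_INFO.items() if kw in table_lower]
--     if hits:
--         return min(hits, key=lambda info: info[0])[1]
--     return f'{table_name.replace("_", " ").title()} data table'
-- ===== Notes on version B (the rewrite author's own statement) =====
-- stated objective: alternative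
-- what changed: Instead of A's priority-ordered if/elif early-return chain, B flattens the rules into a keyword->(priority, description) map, collects ALL matching hits in one comprehension pass and returns min(hits) (lowest priority), falling back to the same titled default.
import Mathlib
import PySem

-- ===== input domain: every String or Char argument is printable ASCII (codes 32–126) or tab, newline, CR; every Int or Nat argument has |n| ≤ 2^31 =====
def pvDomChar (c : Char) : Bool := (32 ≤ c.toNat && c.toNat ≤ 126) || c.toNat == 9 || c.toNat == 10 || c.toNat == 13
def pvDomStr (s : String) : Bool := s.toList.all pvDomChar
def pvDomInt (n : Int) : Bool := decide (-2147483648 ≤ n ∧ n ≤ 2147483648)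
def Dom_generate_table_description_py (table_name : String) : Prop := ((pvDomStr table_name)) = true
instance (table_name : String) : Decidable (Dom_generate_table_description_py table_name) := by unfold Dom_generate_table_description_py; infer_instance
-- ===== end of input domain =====

-- B collects all keyword hits from a flat keyword->(priority,description) map and returns min(hits, key=priority),
-- instead of A's priority-ordered early-return if/elif chain; same values everywhere.

-- ===== PORT A =====
-- hand port of Python's str.title() (exact on ASCII: a letter is uppercased iff the
-- previous character is not a letter, otherwise lowercased); PySem has no title primitive
def pyTitleChars : Bool → List Char → List Char
  | _, [] => []
  | prevAlpha, c :: rest =>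
      (if PySem.Chars.isalpha c then
        (if prevAlpha then PySem.Chars.lowerChar c else PySem.Chars.upperChar c)
      else c) :: pyTitleChars (PySem.Chars.isalpha c) rest

-- f'{table_name.replace("_", " ").title()} data table'
def pyDefaultDesc (table_name : String) : String :=
  String.ofList (pyTitleChars false (PySem.Str.replace table_name "_" " ").toList
             ++ " data table".toList)

def generate_table_description_py (table_name : String) : String :=
  let table_lower := PySem.Str.lower table_name
  if PySem.Str.isIn "user" table_lower then "User account and profile information"
  else if PySem.Str.isIn "order" table_lower then "Order transactions and purchase records"
  else if PySem.Str.isIn "product" table_lower then "Product catalog and inventory data"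
  else if PySem.Str.isIn "customer" table_lower then "Customer information and details"
  else if PySem.Str.isIn "mapping" table_lower || PySem.Str.isIn "junction" table_lower then
    "Junction table for many-to-many relationships"
  else if (["log", "audit", "history"].any fun w => PySem.Str.isIn w table_lower) then
    "Historical records and audit trail"
  else if PySem.Str.isIn "config" table_lower || PySem.Str.isIn "setting" table_lower then
    "Configuration and system settings"
  else pyDefaultDesc table_name

-- ===== PORT B =====
-- the _KEYWORD_INFO dict of Source B, in insertion order
def kwInfo : List (String × (Int × String)) :=
  [ ("user", (0, "User account and profile information")),
    ("order", (1, "Order transactions and purchase records")),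
    ("product", (2, "Product catalog and inventory data")),
    ("customer", (3, "Customer information and details")),
    ("mapping", (4, "Junction table for many-to-many relationships")),
    ("junction", (4, "Junction table for many-to-many relationships")),
    ("log", (5, "Historical records and audit trail")),
    ("audit", (5, "Historical records and audit trail")),
    ("history", (5, "Historical records and audit trail")),
    ("config", (6, "Configuration and system settings")),
    ("setting", (6, "Configuration and system settings")) ]

-- min(hits, key=lambda info: info[0]): Python's min keeps the FIRST element with minimal key
def pyMinPair (h : Int × String) (t : List (Int × String)) : Int × String :=
  t.foldl (fun best x => if x.1 < best.1 then x else best) h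

def generate_table_description_py_alt (table_name : String) : String :=
  let table_lower := PySem.Str.lower table_name
  let hits := (kwInfo.filter fun p => PySem.Str.isIn p.1 table_lower).map Prod.snd
  match hits with
  | h :: t => (pyMinPair h t).2
  | [] => pyDefaultDesc table_name

-- ===== PRECONDITION & SPEC =====
def Spec_generate_table_description_py (table_name : String) (out : String) : Prop := out = generate_table_description_py_alt table_name
instance (table_name : String) (out : String) : Decidable (Spec_generate_table_description_py table_name out) := by unfold Spec_generate_table_description_py; infer_instance

-- ===== CLAIM (what is proved, stated in full; the proofs are below) =====
def Claim_equal_generate_table_description_py : Prop := ∀ (table_name : String), Dom_generate_table_description_py table_name → Spec_generate_table_description_py table_name (generate_table_description_py table_name)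

-- ===== LEMMAS AND PROOFS =====

-- Python's min(key=first component) keeps the first element when nothing later is strictly smaller
theorem pyMinPair_eq_head : ∀ (t : List (Int × String)) (h : Int × String),
    (∀ x ∈ t, ¬ x.1 < h.1) → pyMinPair h t = h
  | [], _, _ => rfl
  | a :: t, h, hb => by
      unfold pyMinPair
      simp only [List.foldl_cons]
      rw [if_neg (fun hlt => hb a (by simp) hlt)]
      exact pyMinPair_eq_head t h (fun x hx => hb x (by simp [hx]))

-- since kwInfo's priorities are nondecreasing, B returns the description of the FIRST hit
theorem alt_eq_headHit (tn : String) :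
    generate_table_description_py_alt tn =
      match kwInfo.filter (fun p => PySem.Chars.isIn p.1.toList (PySem.Chars.lower tn.toList)) with
      | e :: _ => e.2.2
      | [] => pyDefaultDesc tn := by
  unfold generate_table_description_py_alt
  simp only [PySem.Str.isIn_eq, PySem.Str.toList_lower]
  cases hfe : kwInfo.filter (fun p => PySem.Chars.isIn p.1.toList (PySem.Chars.lower tn.toList)) with
  | nil => rfl
  | cons e l' =>
      simp only [List.map_cons]
      have hp : List.Pairwise (fun a b : String × (Int × String) => a.2.1 ≤ b.2.1) kwInfo := by
        decide
      have hp' := hp.filter (fun p => PySem.Chars.isIn p.1.toList (PySem.Chars.lower tn.toList))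
      rw [hfe] at hp'
      have hb : ∀ x ∈ l'.map Prod.snd, ¬ x.1 < (Prod.snd e).1 := by
        intro x hx
        obtain ⟨a, ha, rfl⟩ := List.mem_map.mp hx
        exact not_lt.mpr ((List.pairwise_cons.mp hp').1 a ha)
      rw [pyMinPair_eq_head _ _ hb]

-- ===== VERDICT (by name: the statement is the Claim_ definition above) =====
set_option maxHeartbeats 1000000 in
theorem generate_table_description_py_spec : Claim_equal_generate_table_description_py := by
  intro t _
  unfold Spec_generate_table_description_py
  rw [alt_eq_headHit]
  unfold generate_table_description_py
  cases h1 : PySem.Chars.isIn ['u', 's', 'e', 'r'] (PySem.Chars.lower t.toList) with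
  | true => simp [kwInfo, h1]
  | false =>
  cases h2 : PySem.Chars.isIn ['o', 'r', 'd', 'e', 'r'] (PySem.Chars.lower t.toList) with
  | true => simp [kwInfo, h1, h2]
  | false =>
  cases h3 : PySem.Chars.isIn ['p', 'r', 'o', 'd', 'u', 'c', 't'] (PySem.Chars.lower t.toList) with
  | true => simp [kwInfo, h1, h2, h3]
  | false =>
  cases h4 : PySem.Chars.isIn ['c', 'u', 's', 't', 'o', 'm', 'e', 'r'] (PySem.Chars.lower t.toList) with
  | true => simp [kwInfo, h1, h2, h3, h4]
  | false =>
  cases h5 : PySem.Chars.isIn ['m', 'a', 'p', 'p', 'i', 'n', 'g'] (PySem.Chars.lower t.toList) with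
  | true => simp [kwInfo, h1, h2, h3, h4, h5]
  | false =>
  cases h6 : PySem.Chars.isIn ['j', 'u', 'n', 'c', 't', 'i', 'o', 'n'] (PySem.Chars.lower t.toList) with
  | true => simp [kwInfo, h1, h2, h3, h4, h5, h6]
  | false =>
  cases h7 : PySem.Chars.isIn ['l', 'o', 'g'] (PySem.Chars.lower t.toList) with
  | true => simp [kwInfo, h1, h2, h3, h4, h5, h6, h7]
  | false =>
  cases h8 : PySem.Chars.isIn ['a', 'u', 'd', 'i', 't'] (PySem.Chars.lower t.toList) with
  | true => simp [kwInfo, h1, h2, h3, h4, h5, h6, h7, h8]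
  | false =>
  cases h9 : PySem.Chars.isIn ['h', 'i', 's', 't', 'o', 'r', 'y'] (PySem.Chars.lower t.toList) with
  | true => simp [kwInfo, h1, h2, h3, h4, h5, h6, h7, h8, h9]
  | false =>
  cases h10 : PySem.Chars.isIn ['c', 'o', 'n', 'f', 'i', 'g'] (PySem.Chars.lower t.toList) with
  | true => simp [kwInfo, h1, h2, h3, h4, h5, h6, h7, h8, h9, h10]
  | false =>
  cases h11 : PySem.Chars.isIn ['s', 'e', 't', 't', 'i', 'n', 'g'] (PySem.Chars.lower t.toList) with
  | true => simp [kwInfo, h1, h2, h3, h4, h5, h6, h7, h8, h9, h10, h11]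
  | false =>
  simp [kwInfo, h1, h2, h3, h4, h5, h6, h7, h8, h9, h10, h11]
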